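-- pv_equiv track=rewrite | github.com/dkrupali56/Devsnest-DSA | Palindromic Staircase.py | solve
-- ===== SOURCE A (Python) =====
-- def solve(n):
--     # CODE HERE
--     l=[]
--     for i in range(1,n+1):
--         s=""
--         c=""
--         for j in range(1,i+1):
--             s=s+str(j)
--         for k in range(i-1,0,-1):
--             c=c+str(k)
--         l.append(s+c)
--     return l
-- ===== SOURCE B (Python) =====
-- def solve(n):
--     # Incremental accumulation: keep the ascending and descending halves
--     # across iterations instead of rebuilding each row with inner loops.
--     l = []
--     asc = ""
--     desc = ""
--     for i in range(1, n + 1):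
--         if i > 1:
--             desc = str(i - 1) + desc
--         asc = asc + str(i)
--         l.append(asc + desc)
--     return l
-- ===== Notes on version B (the rewrite author's own statement) =====
-- stated objective: faster
-- what changed: Replaces the two inner loops that rebuild each row from scratch with ascending/descending string accumulators carried across the outer loop, so each row is one concatenation.
import Mathlib
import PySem

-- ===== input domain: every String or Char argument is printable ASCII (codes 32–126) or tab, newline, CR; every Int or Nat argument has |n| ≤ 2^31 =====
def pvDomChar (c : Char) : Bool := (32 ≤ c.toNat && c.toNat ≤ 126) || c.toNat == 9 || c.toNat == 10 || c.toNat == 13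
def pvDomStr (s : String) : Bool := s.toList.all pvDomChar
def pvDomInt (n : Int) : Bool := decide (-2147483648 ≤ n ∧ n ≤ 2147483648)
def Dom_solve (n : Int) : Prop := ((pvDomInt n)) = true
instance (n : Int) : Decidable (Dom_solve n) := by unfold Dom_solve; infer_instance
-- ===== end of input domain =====

-- B replaces A's two inner row-rebuilding loops by ascending/descending string
-- accumulators carried across the outer loop (objective: faster, constant-factor).

-- ===== PORT A =====
def solve (n : Int) : List String :=
  (PySem.List.pyRange 1 (n + 1) 1).foldl
    (fun l i =>
      let s := (PySem.List.pyRange 1 (i + 1) 1).foldl (fun s j => s ++ PySem.Int.toStr j) ""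
      let c := (PySem.List.pyRange (i - 1) 0 (-1)).foldl (fun c k => c ++ PySem.Int.toStr k) ""
      l ++ [s ++ c])
    []

-- ===== PORT B =====
def solve_alt (n : Int) : List String :=
  ((PySem.List.pyRange 1 (n + 1) 1).foldl
    (fun (st : List String × String × String) i =>
      let desc := if 1 < i then PySem.Int.toStr (i - 1) ++ st.2.2 else st.2.2
      let asc := st.2.1 ++ PySem.Int.toStr i
      (st.1 ++ [asc ++ desc], asc, desc))
    ([], "", "")).1

-- ===== PRECONDITION & SPEC =====
def Spec_solve (n : Int) (out : List String) : Prop := out = solve_alt n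
instance (n : Int) (out : List String) : Decidable (Spec_solve n out) := by unfold Spec_solve; infer_instance

-- ===== CLAIM (what is proved, stated in full; the proofs are below) =====
def Claim_equal_solve : Prop := ∀ (n : Int), Dom_solve n → Spec_solve n (solve n)

-- ===== LEMMAS AND PROOFS =====

-- A's inner ascending fold for row i
def ascS (i : Int) : String :=
  (PySem.List.pyRange 1 (i + 1) 1).foldl (fun s j => s ++ PySem.Int.toStr j) ""

-- A's inner descending fold for row i
def descS (i : Int) : String :=
  (PySem.List.pyRange (i - 1) 0 (-1)).foldl (fun c k => c ++ PySem.Int.toStr k) ""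

theorem foldl_append_pull (f : Int → String) (l : List Int) (a b : String) :
    l.foldl (fun c k => c ++ f k) (a ++ b) = a ++ l.foldl (fun c k => c ++ f k) b := by
  induction l generalizing b with
  | nil => rfl
  | cons h t ih => simp only [List.foldl_cons, String.append_assoc, ih]

theorem ascS_succ (i : Int) (h : 0 ≤ i) : ascS (i + 1) = ascS i ++ PySem.Int.toStr (i + 1) := by
  unfold ascS
  rw [show i + 1 + 1 = (i + 1) + 1 from rfl,
      PySem.List.pyRange_one_succ_right (by omega : (1 : Int) ≤ i + 1), List.foldl_append]
  rfl

theorem descS_succ (i : Int) (h : 1 ≤ i) :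
    descS (i + 1) = PySem.Int.toStr i ++ descS i := by
  unfold descS
  rw [show i + 1 - 1 = i from by ring,
      PySem.List.pyRange_neg_one_cons (by omega : (0 : Int) < i), List.foldl_cons]
  have : ("" : String) ++ PySem.Int.toStr i = PySem.Int.toStr i ++ "" := by simp
  rw [this, foldl_append_pull]

theorem descS_one : descS 1 = descS 0 := by
  unfold descS
  rw [PySem.List.pyRange_neg_one_eq_nil (by norm_num),
      PySem.List.pyRange_neg_one_eq_nil (by norm_num)]

theorem main_invariant (m : Nat) :
    (PySem.List.pyRange 1 ((m : Int) + 1) 1).foldl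
      (fun (st : List String × String × String) i =>
        let desc := if 1 < i then PySem.Int.toStr (i - 1) ++ st.2.2 else st.2.2
        let asc := st.2.1 ++ PySem.Int.toStr i
        (st.1 ++ [asc ++ desc], asc, desc))
      ([], "", "")
    = ((PySem.List.pyRange 1 ((m : Int) + 1) 1).foldl
        (fun l i =>
          let s := (PySem.List.pyRange 1 (i + 1) 1).foldl (fun s j => s ++ PySem.Int.toStr j) ""
          let c := (PySem.List.pyRange (i - 1) 0 (-1)).foldl (fun c k => c ++ PySem.Int.toStr k) ""
          l ++ [s ++ c])
        [],
       ascS (m : Int), descS (m : Int)) := by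
  induction m with
  | zero =>
    rw [PySem.List.pyRange_one_eq_nil (by norm_num)]
    unfold ascS descS
    rw [PySem.List.pyRange_one_eq_nil (by norm_num),
        PySem.List.pyRange_neg_one_eq_nil (by norm_num)]
    rfl
  | succ m ih =>
    have hcast : ((m + 1 : Nat) : Int) + 1 = ((m : Int) + 1) + 1 := by push_cast; ring
    rw [hcast, PySem.List.pyRange_one_succ_right (by omega : (1 : Int) ≤ (m : Int) + 1),
        List.foldl_append, List.foldl_append, ih, List.foldl_cons, List.foldl_cons,
        List.foldl_nil, List.foldl_nil]
    have hasc : ascS ((m : Int) + 1) = ascS (m : Int) ++ PySem.Int.toStr ((m : Int) + 1) :=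
      ascS_succ _ (by omega)
    have hdesc : descS ((m : Int) + 1) =
        if 1 < (m : Int) + 1 then PySem.Int.toStr ((m : Int) + 1 - 1) ++ descS (m : Int)
        else descS (m : Int) := by
      rcases Nat.eq_zero_or_pos m with hm | hm
      · subst hm
        rw [if_neg (by norm_num)]
        exact descS_one
      · rw [if_pos (by omega : (1 : Int) < (m : Int) + 1),
            show (m : Int) + 1 - 1 = (m : Int) from by ring]
        exact descS_succ _ (by omega)
    push_cast
    rw [← hasc, ← hdesc]
    rfl

theorem solve_eq_alt (n : Int) : solve n = solve_alt n := by
  unfold solve solve_alt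
  by_cases hn : n ≤ 0
  · rw [PySem.List.pyRange_one_eq_nil (by omega)]
    rfl
  · have hm : ((n.toNat : Int)) = n := Int.toNat_of_nonneg (by omega)
    have := main_invariant n.toNat
    rw [hm] at this
    rw [this]

-- ===== VERDICT (by name: the statement is the Claim_ definition above) =====
theorem solve_spec : Claim_equal_solve := by
  intro n _
  unfold Spec_solve
  exact solve_eq_alt n
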